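-- pv_equiv track=rewrite | github.com/ScreepCode/Jarvis-VoiceAssistent | Modules/Webunits.py | parseSubjectNames
-- ===== SOURCE A (Python) =====
-- def parseSubjectNames(stunden):
--     for x in range(len(stunden)):
--         if("M-" in stunden[x]):
--             stunden[x] = "Mathe"
--         elif("D-" in stunden[x]):
--             stunden[x] = "Deutsch"
--         elif("E-" in stunden[x]):
--             stunden[x] = "Englisch"
--         elif("IF-" in stunden[x]):
--             stunden[x] = "Informatik"
--         elif("SW-" in stunden[x]):
--             stunden[x] = "SoWi"
--         elif("PH-" in stunden[x]):
--             stunden[x] = "Physik"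
--         elif("SP-" in stunden[x]):
--             stunden[x] = "Sport"
--         elif("GE-" in stunden[x]):
--             stunden[x] = "Geschichte"
--         elif("ER-" in stunden[x]):
--             stunden[x] = "Religion"
--         elif("CH-" in stunden[x]):
--             stunden[x] = "Chemie"
--
--     return stunden
-- ===== SOURCE B (Python) =====
-- # Loop interchange: one pass over the subject table, each marking matching not-yet-labelled
-- # elements, instead of A's per-element elif chain; returns a NEW list (A mutates in place).
-- _SUBJECTS = [("M-", "Mathe"), ("D-", "Deutsch"), ("E-", "Englisch"),
--              ("IF-", "Informatik"), ("SW-", "SoWi"), ("PH-", "Physik"),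
--              ("SP-", "Sport"), ("GE-", "Geschichte"), ("ER-", "Religion"),
--              ("CH-", "Chemie")]
--
-- def parseSubjectNames(stunden):
--     state = [(s, False) for s in stunden]
--     for pat, name in _SUBJECTS:
--         state = [(name, True) if (not done and pat in s) else (s, done)
--                  for s, done in state]
--     return [s for s, _ in state]
-- ===== Notes on version B (the rewrite author's own statement) =====
-- stated objective: alternative
-- what changed: Interchanges the loops: instead of A's per-element 10-branch elif chain, B makes one staged pass per (prefix, name) table entry over the whole list, marking matched elements with a done flag so earlier patterns keep priority; B builds a new list instead of mutating in place.
import Mathlib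
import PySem

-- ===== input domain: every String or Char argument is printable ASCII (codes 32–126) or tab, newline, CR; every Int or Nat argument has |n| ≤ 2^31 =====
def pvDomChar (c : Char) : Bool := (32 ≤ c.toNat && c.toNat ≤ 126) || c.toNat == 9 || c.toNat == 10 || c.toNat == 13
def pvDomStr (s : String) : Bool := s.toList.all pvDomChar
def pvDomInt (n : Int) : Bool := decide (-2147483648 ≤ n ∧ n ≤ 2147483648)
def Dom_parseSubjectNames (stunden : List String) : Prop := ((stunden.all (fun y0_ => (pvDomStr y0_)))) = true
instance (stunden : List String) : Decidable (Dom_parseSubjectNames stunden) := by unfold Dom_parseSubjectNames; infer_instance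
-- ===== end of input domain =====

-- B interchanges A's loops (one staged pass per table entry, with a done flag) and builds a
-- new list; A mutates its argument in place — the equivalence proved is about the return value.

-- ===== PORT A =====
-- the elif chain of A's loop body, applied to stunden[x]
def pvChainA (s : String) : String :=
  if PySem.Str.isIn "M-" s then "Mathe"
  else if PySem.Str.isIn "D-" s then "Deutsch"
  else if PySem.Str.isIn "E-" s then "Englisch"
  else if PySem.Str.isIn "IF-" s then "Informatik"
  else if PySem.Str.isIn "SW-" s then "SoWi"
  else if PySem.Str.isIn "PH-" s then "Physik"
  else if PySem.Str.isIn "SP-" s then "Sport"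
  else if PySem.Str.isIn "GE-" s then "Geschichte"
  else if PySem.Str.isIn "ER-" s then "Religion"
  else if PySem.Str.isIn "CH-" s then "Chemie"
  else s

-- for x in range(len(stunden)): stunden[x] = <elif chain on stunden[x]>; return stunden
def parseSubjectNames (stunden : List String) : List String :=
  (PySem.List.pyRange 0 stunden.length 1).foldl
    (fun acc x => acc.set x.toNat (pvChainA (PySem.List.pyGetD acc x "")))
    stunden

-- ===== PORT B =====
def pvSubjects : List (String × String) :=
  [("M-", "Mathe"), ("D-", "Deutsch"), ("E-", "Englisch"),
   ("IF-", "Informatik"), ("SW-", "SoWi"), ("PH-", "Physik"),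
   ("SP-", "Sport"), ("GE-", "Geschichte"), ("ER-", "Religion"),
   ("CH-", "Chemie")]

def parseSubjectNames_alt (stunden : List String) : List String :=
  (pvSubjects.foldl
    (fun state pn =>
      state.map (fun sd =>
        if !sd.2 && PySem.Str.isIn pn.1 sd.1 then (pn.2, true) else sd))
    (stunden.map (fun s => (s, false)))).map (·.1)

-- ===== PRECONDITION & SPEC =====
def Spec_parseSubjectNames (stunden : List String) (out : List String) : Prop := out = parseSubjectNames_alt stunden
instance (stunden : List String) (out : List String) : Decidable (Spec_parseSubjectNames stunden out) := by unfold Spec_parseSubjectNames; infer_instance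

-- ===== CLAIM (what is proved, stated in full; the proofs are below) =====
def Claim_equal_parseSubjectNames : Prop := ∀ (stunden : List String), Dom_parseSubjectNames stunden → Spec_parseSubjectNames stunden (parseSubjectNames stunden)

-- ===== LEMMAS AND PROOFS =====

-- A's index loop writing acc[x] := chain(acc[x]) maps the chain over the list
theorem pvLoopA (suf : List String) : ∀ (pre : List String),
    (PySem.List.pyRange pre.length (pre.length + suf.length) 1).foldl
      (fun acc x => acc.set x.toNat (pvChainA (PySem.List.pyGetD acc x "")))
      (pre ++ suf)
    = pre ++ suf.map pvChainA := by
  induction suf with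
  | nil => intro pre; simp [PySem.List.pyRange_one_eq_nil]
  | cons s rest ih =>
    intro pre
    rw [PySem.List.pyRange_one_cons (by simp)]
    have hget : PySem.List.pyGetD (pre ++ s :: rest) (pre.length : Int) "" = s := by
      rw [PySem.List.pyGetD_natCast]
      simp
    have hset : (pre ++ s :: rest).set ((pre.length : Int)).toNat (pvChainA s)
        = (pre ++ [pvChainA s]) ++ rest := by
      simp
    have harith : ((pre.length : Int) + 1 : Int) = ((pre ++ [pvChainA s]).length : Int) := by
      simp
    have harith2 : ((pre.length : Int) + (s :: rest).length : Int)
        = ((pre ++ [pvChainA s]).length : Int) + rest.length := by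
      simp
      push_cast
      ring
    simp only [List.foldl_cons, hget, hset, harith, harith2]
    rw [ih (pre ++ [pvChainA s])]
    simp

theorem pvA_eq_map (stunden : List String) :
    parseSubjectNames stunden = stunden.map pvChainA := by
  have := pvLoopA stunden []
  simpa [parseSubjectNames] using this

-- folding per-element maps commutes with the list
theorem pvFoldlMapComm (g : String × String → String × Bool → String × Bool) :
    ∀ (ps : List (String × String)) (l : List (String × Bool)),
      ps.foldl (fun st pn => st.map (g pn)) l
        = l.map (fun x => ps.foldl (fun x pn => g pn x) x) := by
  intro ps
  induction ps with
  | nil => intro l; simp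
  | cons p rest ih => intro l; simp [List.foldl_cons, ih, List.map_map, Function.comp]

-- per-element: the staged table fold over a single flagged element computes A's elif chain
theorem pvElem (s : String) :
    (pvSubjects.foldl
      (fun (x : String × Bool) pn =>
        if !x.2 && PySem.Str.isIn pn.1 x.1 then (pn.2, true) else x)
      (s, false)).1 = pvChainA s := by
  by_cases h1 : PySem.Chars.isIn ['M', '-'] s.toList = true
  · simp [pvSubjects, pvChainA, h1]
  · by_cases h2 : PySem.Chars.isIn ['D', '-'] s.toList = true
    · simp [pvSubjects, pvChainA, h1, h2]
    · by_cases h3 : PySem.Chars.isIn ['E', '-'] s.toList = true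
      · simp [pvSubjects, pvChainA, h1, h2, h3]
      · by_cases h4 : PySem.Chars.isIn ['I', 'F', '-'] s.toList = true
        · simp [pvSubjects, pvChainA, h1, h2, h3, h4]
        · by_cases h5 : PySem.Chars.isIn ['S', 'W', '-'] s.toList = true
          · simp [pvSubjects, pvChainA, h1, h2, h3, h4, h5]
          · by_cases h6 : PySem.Chars.isIn ['P', 'H', '-'] s.toList = true
            · simp [pvSubjects, pvChainA, h1, h2, h3, h4, h5, h6]
            · by_cases h7 : PySem.Chars.isIn ['S', 'P', '-'] s.toList = true
              · simp [pvSubjects, pvChainA, h1, h2, h3, h4, h5, h6, h7]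
              · by_cases h8 : PySem.Chars.isIn ['G', 'E', '-'] s.toList = true
                · simp [pvSubjects, pvChainA, h1, h2, h3, h4, h5, h6, h7, h8]
                · by_cases h9 : PySem.Chars.isIn ['E', 'R', '-'] s.toList = true
                  · simp [pvSubjects, pvChainA, h1, h2, h3, h4, h5, h6, h7, h8, h9]
                  · by_cases h10 : PySem.Chars.isIn ['C', 'H', '-'] s.toList = true
                    · simp [pvSubjects, pvChainA, h1, h2, h3, h4, h5, h6, h7, h8, h9, h10]
                    · simp [pvSubjects, pvChainA, h1, h2, h3, h4, h5, h6, h7, h8, h9, h10]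

theorem pvB_eq_map (stunden : List String) :
    parseSubjectNames_alt stunden = stunden.map pvChainA := by
  unfold parseSubjectNames_alt
  rw [pvFoldlMapComm]
  rw [List.map_map, List.map_map]
  apply List.map_congr_left
  intro s _
  exact pvElem s

-- ===== VERDICT (by name: the statement is the Claim_ definition above) =====
theorem parseSubjectNames_spec : Claim_equal_parseSubjectNames := by
  intro stunden _
  unfold Spec_parseSubjectNames
  rw [pvA_eq_map, pvB_eq_map]
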